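-- pv_equiv track=rewrite | github.com/dtg01100/pure3270 | tools/auth_testing_suite.py | _summarize_vulnerability_tests
-- ===== SOURCE A (Python) =====
-- from typing import Any, Dict, List, Optional, Tuple
--
-- def _summarize_vulnerability_tests(
--     test_results: List[Dict[str, Any]]
-- ) -> Dict[str, Any]:
--     """Summarize vulnerability test results"""
--     high_risk = len([r for r in test_results if r.get("risk_level") == "high"])
--     medium_risk = len([r for r in test_results if r.get("risk_level") == "medium"])
--     low_risk = len([r for r in test_results if r.get("risk_level") == "low"])
--
--     return {
--         "total_tests": len(test_results),
--         "high_risk": high_risk,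
--         "medium_risk": medium_risk,
--         "low_risk": low_risk,
--     }
-- ===== SOURCE B (Python) =====
-- from typing import Any, Dict, List
--
-- def _summarize_vulnerability_tests(
--     test_results: List[Dict[str, Any]]
-- ) -> Dict[str, Any]:
--     """Summarize vulnerability test results via a generic frequency map.
--
--     Builds one frequency dictionary keyed by whatever risk_level values occur
--     (a Counter over all levels), then reads the three levels of interest out
--     of it with .get defaults.
--     """
--     counts: Dict[Any, int] = {}
--     for r in test_results:
--         level = r.get("risk_level")
--         counts[level] = counts.get(level, 0) + 1
--     return {
--         "total_tests": len(test_results),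
--         "high_risk": counts.get("high", 0),
--         "medium_risk": counts.get("medium", 0),
--         "low_risk": counts.get("low", 0),
--     }
-- ===== Notes on version B (the rewrite author's own statement) =====
-- stated objective: alternative
-- what changed: Replaces three per-level filtering scans with one pass that builds a generic frequency dictionary over all observed risk_level values, then reads the three levels of interest out of it with .get defaults.
import Mathlib
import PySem

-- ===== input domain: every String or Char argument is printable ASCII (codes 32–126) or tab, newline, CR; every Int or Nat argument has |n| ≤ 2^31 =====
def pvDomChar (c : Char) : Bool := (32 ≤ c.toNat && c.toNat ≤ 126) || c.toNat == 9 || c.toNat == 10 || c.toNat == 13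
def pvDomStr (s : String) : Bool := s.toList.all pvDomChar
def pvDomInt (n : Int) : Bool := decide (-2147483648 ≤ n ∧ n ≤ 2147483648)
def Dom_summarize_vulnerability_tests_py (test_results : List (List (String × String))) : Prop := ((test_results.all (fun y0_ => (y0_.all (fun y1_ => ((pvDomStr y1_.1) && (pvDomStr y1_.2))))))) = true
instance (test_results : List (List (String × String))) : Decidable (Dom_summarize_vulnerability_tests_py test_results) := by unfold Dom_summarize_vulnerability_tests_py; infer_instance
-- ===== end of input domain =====

-- B replaces A's three per-level filtering scans with one pass building a generic
-- frequency dictionary over all observed risk_level values, read out with defaults (objective: alternative).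

-- ===== PORT A =====
-- r.get("risk_level") on a dict row; both ports use the same lookup primitive.
def pvGetRisk (r : List (String × String)) : Option String :=
  (PySem.Dict.mk r).get? "risk_level"

def summarize_vulnerability_tests_py (test_results : List (List (String × String))) : List (String × Int) :=
  let high_risk : Int := (test_results.filter (fun r => pvGetRisk r == some "high")).length
  let medium_risk : Int := (test_results.filter (fun r => pvGetRisk r == some "medium")).length
  let low_risk : Int := (test_results.filter (fun r => pvGetRisk r == some "low")).length
  [("total_tests", (test_results.length : Int)),
   ("high_risk", high_risk),
   ("medium_risk", medium_risk),
   ("low_risk", low_risk)]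

-- ===== PORT B =====
-- one pass: counts[level] = counts.get(level, 0) + 1 per row, then counts.get(level, 0) readouts
def summarize_vulnerability_tests_py_alt (test_results : List (List (String × String))) : List (String × Int) :=
  let counts : PySem.Dict (Option String) Int := test_results.foldl
    (fun d r =>
      let level := pvGetRisk r
      d.insert level (d.getD level 0 + 1))
    PySem.Dict.empty
  [("total_tests", (test_results.length : Int)),
   ("high_risk", counts.getD (some "high") 0),
   ("medium_risk", counts.getD (some "medium") 0),
   ("low_risk", counts.getD (some "low") 0)]

-- ===== PRECONDITION & SPEC =====
def Spec_summarize_vulnerability_tests_py (test_results : List (List (String × String))) (out : List (String × Int)) : Prop := out = summarize_vulnerability_tests_py_alt test_results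
instance (test_results : List (List (String × String))) (out : List (String × Int)) : Decidable (Spec_summarize_vulnerability_tests_py test_results out) := by unfold Spec_summarize_vulnerability_tests_py; infer_instance

-- ===== CLAIM (what is proved, stated in full; the proofs are below) =====
def Claim_equal_summarize_vulnerability_tests_py : Prop := ∀ (test_results : List (List (String × String))), Dom_summarize_vulnerability_tests_py test_results → Spec_summarize_vulnerability_tests_py test_results (summarize_vulnerability_tests_py test_results)

-- ===== LEMMAS AND PROOFS =====
-- B's frequency map read at any level equals the number of rows with that level.
lemma pvCounts_getD (test_results : List (List (String × String))) (v : Option String) :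
    ((test_results.foldl
        (fun (d : PySem.Dict (Option String) Int) r =>
          let level := pvGetRisk r
          d.insert level (d.getD level 0 + 1))
        PySem.Dict.empty).getD v 0)
    = ((test_results.filter (fun r => pvGetRisk r == v)).length : Int) := by
  have h : (test_results.foldl
        (fun (d : PySem.Dict (Option String) Int) r =>
          let level := pvGetRisk r
          d.insert level (d.getD level 0 + 1))
        PySem.Dict.empty)
      = ((test_results.map pvGetRisk).foldl
          (fun (d : PySem.Dict (Option String) Int) x => d.insert x (d.getD x 0 + 1))
          PySem.Dict.empty) := by
    rw [List.foldl_map]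
  rw [h, PySem.Dict.getD_foldl_insert_add_one, PySem.Dict.getD_empty]
  simp [List.count_eq_countP, ← List.countP_eq_length_filter, List.countP_map, Function.comp_def]

-- ===== VERDICT (by name: the statement is the Claim_ definition above) =====
theorem summarize_vulnerability_tests_py_spec : Claim_equal_summarize_vulnerability_tests_py := by
  intro test_results _
  unfold Spec_summarize_vulnerability_tests_py summarize_vulnerability_tests_py summarize_vulnerability_tests_py_alt
  simp only [pvCounts_getD]
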